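-- pv_equiv track=rewrite | github.com/mamar828/Stage | HI_regions/shear_detection.py | get_point_groups
-- ===== SOURCE A (Python) =====
-- def get_point_groups(points: list, max_regroup_separation: int) -> list:
--     """
--     Give the bounds of every group in a list.
--
--     Arguments
--     ---------
--     points: list. Data that needs to be grouped.
--     max_regroup_separation: int. Maximum separation of two consecutive points that will be considered to belong to
--         the same signal drop section. This controls how many different regions will be outputted and will merge
--         those that are close.
--
--     Returns
--     -------
--     list: each element is a list containing the bounds of a group.
--     """
--     groups = [[points[0], points[0]]]
--     for point in points[1:]:
--         if groups[-1][1] + max_regroup_separation >= point: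
--             groups[-1][1] = point
--         else:
--             groups.append([point, point])
--     return groups
-- ===== SOURCE B (Python) =====
-- def get_point_groups(points: list, max_regroup_separation: int) -> list:
--     for i in range(1, len(points)):
--         if points[i] - points[i - 1] > max_regroup_separation:
--             return [[points[0], points[i - 1]]] + get_point_groups(points[i:], max_regroup_separation)
--     return [[points[0], points[-1]]]
-- ===== Notes on version B (the rewrite author's own statement) =====
-- stated objective: alternative
-- what changed: B recursively splits the list at the first gap larger than the threshold and emits [first, last-before-gap] per run, instead of A's single pass that mutates the last group's upper bound in a growing list of groups.
import Mathlib
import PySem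

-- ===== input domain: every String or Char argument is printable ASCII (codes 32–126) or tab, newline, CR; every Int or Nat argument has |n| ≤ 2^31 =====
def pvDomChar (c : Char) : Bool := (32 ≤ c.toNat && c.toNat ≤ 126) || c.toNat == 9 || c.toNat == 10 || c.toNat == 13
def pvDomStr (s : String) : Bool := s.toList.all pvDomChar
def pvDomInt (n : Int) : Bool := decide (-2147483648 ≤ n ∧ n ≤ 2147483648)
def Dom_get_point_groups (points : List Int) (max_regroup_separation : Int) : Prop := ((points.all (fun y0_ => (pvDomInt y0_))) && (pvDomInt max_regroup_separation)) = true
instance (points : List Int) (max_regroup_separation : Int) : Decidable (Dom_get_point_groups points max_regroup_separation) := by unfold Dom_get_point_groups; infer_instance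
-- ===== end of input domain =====

-- B recursively splits the list at the first over-threshold gap (alternative decomposition,
-- same return values as A wherever A returns; equal cost class).


-- ===== PORT A =====
-- one step of A's for-loop: read groups[-1], either update its upper bound or append a new group
def stepA (sep : Int) (groups : List (List Int)) (point : Int) : List (List Int) :=
  let last := groups.getLastD []
  if last.getD 1 0 + sep ≥ point then
    groups.dropLast ++ [[last.getD 0 0, point]]
  else
    groups ++ [[point, point]]

def get_point_groups (points : List Int) (max_regroup_separation : Int) : List (List Int) :=
  match points with
  | [] => []   -- unreachable under Pre_: Python A raises IndexError on points[0]
  | p :: rest => rest.foldl (stepA max_regroup_separation) [[p, p]]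

-- ===== PORT B =====
-- the scan of Source B's for-loop: walk the tail until the first gap > sep,
-- returning (last point of the current run, the remainder of the list)
def splitRun (sep prev : Int) : List Int → Int × List Int
  | [] => (prev, [])
  | q :: rest => if q - prev > sep then (prev, q :: rest) else splitRun sep q rest

theorem splitRun_snd_length_le (sep prev : Int) (l : List Int) :
    (splitRun sep prev l).2.length ≤ l.length := by
  induction l generalizing prev with
  | nil => simp [splitRun]
  | cons q rest ih =>
    simp only [splitRun]
    split
    · simp
    · exact le_trans (ih q) (Nat.le_succ _)

-- Source B's body on a nonempty list p :: rest
def bGo (sep : Int) (p : Int) (rest : List Int) : List (List Int) :=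
  match h : splitRun sep p rest with
  | (hi, rem) =>
    match rem with
    | [] => [[p, hi]]
    | q :: rest' => [p, hi] :: bGo sep q rest'
termination_by rest.length
decreasing_by
  have := splitRun_snd_length_le sep p rest
  rw [h] at this; simp at this; omega

def get_point_groups_alt (points : List Int) (max_regroup_separation : Int) : List (List Int) :=
  match points with
  | [] => []   -- unreachable under Pre_: Python B raises IndexError on points[0]
  | p :: rest => bGo max_regroup_separation p rest

-- ===== PRECONDITION & SPEC =====
-- Pre_ excludes only the empty list, on which A (points[0]) raises IndexError.
def Pre_get_point_groups (points : List Int) (max_regroup_separation : Int) : Prop := points ≠ []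
instance (points : List Int) (max_regroup_separation : Int) : Decidable (Pre_get_point_groups points max_regroup_separation) := by unfold Pre_get_point_groups; infer_instance
def pvWitness_get_point_groups : List Int × Int := ([0, 5, 6], 2)

def Spec_get_point_groups (points : List Int) (max_regroup_separation : Int) (out : List (List Int)) : Prop := out = get_point_groups_alt points max_regroup_separation
instance (points : List Int) (max_regroup_separation : Int) (out : List (List Int)) : Decidable (Spec_get_point_groups points max_regroup_separation out) := by unfold Spec_get_point_groups; infer_instance

-- ===== CLAIM (what is proved, stated in full; the proofs are below) =====
def Claim_equal_get_point_groups : Prop := ∀ (points : List Int) (max_regroup_separation : Int), Dom_get_point_groups points max_regroup_separation → Pre_get_point_groups points max_regroup_separation → Spec_get_point_groups points max_regroup_separation (get_point_groups points max_regroup_separation)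

-- ===== LEMMAS AND PROOFS =====

-- reference recursion both ports are reduced to: current group bounds (lo, prev), remaining points
def goSpec (sep lo prev : Int) : List Int → List (List Int)
  | [] => [[lo, prev]]
  | q :: rest => if prev + sep ≥ q then goSpec sep lo q rest else [lo, prev] :: goSpec sep q q rest

theorem foldl_stepA (sep : Int) (rest : List Int) :
    ∀ (acc : List (List Int)) (lo prev : Int),
      List.foldl (stepA sep) (acc ++ [[lo, prev]]) rest = acc ++ goSpec sep lo prev rest := by
  induction rest with
  | nil => intro acc lo prev; simp [goSpec]
  | cons q rest ih =>
    intro acc lo prev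
    simp only [List.foldl_cons, stepA, goSpec, List.getLastD_concat, List.dropLast_concat,
      List.getD_cons_succ, List.getD_cons_zero]
    split_ifs with hc
    · exact ih acc lo q
    · have h2 := ih (acc ++ [[lo, prev]]) q q
      rw [List.append_assoc] at h2
      simpa using h2

-- bGo's one-step unfolding as a plain (non-dependent) equation
theorem bGo_eq (sep p : Int) (rest : List Int) :
    bGo sep p rest = match splitRun sep p rest with
      | (hi, []) => [[p, hi]]
      | (hi, q :: rest') => [p, hi] :: bGo sep q rest' := by
  rw [bGo]
  split
  rename_i hi rem hs
  conv_rhs => rw [hs]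
  cases rem <;> rfl

-- goSpec satisfies the same first-break recurrence as bGo
theorem goSpec_split (sep lo : Int) : ∀ (rest : List Int) (prev : Int),
    goSpec sep lo prev rest = match splitRun sep prev rest with
      | (hi, []) => [[lo, hi]]
      | (hi, q :: rest') => [lo, hi] :: goSpec sep q q rest' := by
  intro rest
  induction rest with
  | nil => intro prev; simp [goSpec, splitRun]
  | cons q rest ih =>
    intro prev
    simp only [goSpec, splitRun]
    by_cases hc : prev + sep ≥ q
    · have hng : ¬ (q - prev > sep) := by omega
      rw [if_pos hc, if_neg hng, ih q]
    · have hg : q - prev > sep := by omega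
      rw [if_neg hc, if_pos hg]

theorem bGo_eq_goSpec (sep : Int) : ∀ (n : Nat) (rest : List Int), rest.length ≤ n →
    ∀ p, bGo sep p rest = goSpec sep p p rest := by
  intro n
  induction n with
  | zero =>
    intro rest h p
    have hnil : rest = [] := List.length_eq_zero_iff.mp (Nat.le_zero.mp h)
    subst hnil
    rw [bGo_eq, goSpec_split]
    simp [splitRun]
  | succ n ih =>
    intro rest h p
    rw [bGo_eq, goSpec_split]
    rcases hs : splitRun sep p rest with ⟨hi, rem⟩
    cases rem with
    | nil => rfl
    | cons q rest' =>
      have hle := splitRun_snd_length_le sep p rest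
      rw [hs] at hle
      simp only [List.length_cons] at hle
      show [p, hi] :: bGo sep q rest' = [p, hi] :: goSpec sep q q rest'
      rw [ih rest' (by omega) q]

-- ===== VERDICT (by name: the statement is the Claim_ definition above) =====
theorem get_point_groups_spec : Claim_equal_get_point_groups := by
  intro points sep _ hpre
  unfold Spec_get_point_groups
  cases points with
  | nil => exact absurd rfl hpre
  | cons p rest =>
    show List.foldl (stepA sep) [[p, p]] rest = get_point_groups_alt (p :: rest) sep
    have h := foldl_stepA sep rest [] p p
    simp only [List.nil_append] at h
    rw [h]
    show goSpec sep p p rest = bGo sep p rest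
    exact (bGo_eq_goSpec sep rest.length rest le_rfl p).symm
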